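-- pv_equiv track=rewrite | github.com/prokarius/GITHackathon | Summary.py | removeMultipleSentences
-- ===== SOURCE A (Python) =====
-- sentenceMutipleThreshold = 3
--
-- def removeMultipleSentences(text):
--     dictionary = {}
--
--     for sentence in text:
--         dictionary[sentence] = dictionary.get(sentence, 0) + 1
--
--     result = []
--     for sentence in text:
--         if dictionary[sentence] < sentenceMutipleThreshold:
--             result.append(sentence)
--
--     return result
-- ===== SOURCE B (Python) =====
-- sentenceMutipleThreshold = 3
--
-- def removeMultipleSentences(text):
--     # Sort so equal sentences are adjacent; scan the runs, banning each value
--     # whose run length reaches the threshold; keep the sentences not banned.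
--     srt = sorted(text)
--     banned = set()
--     i, n = 0, len(srt)
--     while i < n:
--         j = i
--         while j < n and srt[j] == srt[i]:
--             j += 1
--         if j - i >= sentenceMutipleThreshold:
--             banned.add(srt[i])
--         i = j
--     return [s for s in text if s not in banned]
-- ===== Notes on version B (the rewrite author's own statement) =====
-- stated objective: alternative
-- what changed: Replaced the frequency-dictionary build-then-filter with a sort-based algorithm: sort the list, scan adjacent runs to collect the sentences whose run length reaches the threshold into a banned set, then keep the sentences not in it.
import Mathlib
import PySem

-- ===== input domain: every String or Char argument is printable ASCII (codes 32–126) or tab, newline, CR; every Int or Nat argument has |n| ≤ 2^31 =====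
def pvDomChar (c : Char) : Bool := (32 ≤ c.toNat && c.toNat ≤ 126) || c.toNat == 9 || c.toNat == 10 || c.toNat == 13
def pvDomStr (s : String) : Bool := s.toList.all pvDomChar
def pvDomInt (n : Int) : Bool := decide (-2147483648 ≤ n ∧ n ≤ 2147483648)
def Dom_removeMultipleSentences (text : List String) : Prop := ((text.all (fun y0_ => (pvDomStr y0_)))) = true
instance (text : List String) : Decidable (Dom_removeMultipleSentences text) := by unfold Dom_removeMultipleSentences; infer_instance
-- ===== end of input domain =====

-- B replaces A's frequency-dictionary build-then-filter with a sort-and-scan-runs algorithm: sort, collect run values of length ≥ 3 into a banned set, filter; same return value.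


-- ===== PORT A =====
-- literal port of A: build a count dictionary, then filter by it
def removeMultipleSentences (text : List String) : List String :=
  let dictionary : PySem.Dict String Int :=
    text.foldl (fun d sentence => d.insert sentence (d.getD sentence 0 + 1)) PySem.Dict.empty
  text.foldl (fun result sentence =>
    if dictionary.getD sentence 0 < 3 then result ++ [sentence] else result) []

-- ===== PORT B =====
-- port of B's run scan over the sorted list: each outer-loop step measures the
-- current run (j - i = 1 + takeWhile of the tail) and advances i to the run's end
-- (dropWhile); run heads whose run length reaches the threshold are collected
def pvFrequent : List String → List String
  | [] => []
  | head :: xs =>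
    let run := xs.takeWhile (fun y => y == head)
    let rest := pvFrequent (xs.dropWhile (fun y => y == head))
    if 3 ≤ 1 + run.length then head :: rest else rest
termination_by l => l.length
decreasing_by
  have := List.length_dropWhile_le (fun y => y == head) xs
  simp; omega

-- port of B: banned = set of collected run heads of sorted(text), then filter by non-membership
def removeMultipleSentences_alt (text : List String) : List String :=
  let banned : PySem.Set String :=
    PySem.Set.ofList (pvFrequent (PySem.List.sorted text (fun x => x) false))
  text.filter (fun s => !(PySem.Set.contains banned s))

-- ===== PRECONDITION & SPEC =====
def Spec_removeMultipleSentences (text : List String) (out : List String) : Prop := out = removeMultipleSentences_alt text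
instance (text : List String) (out : List String) : Decidable (Spec_removeMultipleSentences text out) := by unfold Spec_removeMultipleSentences; infer_instance

-- ===== CLAIM =====
def Claim_equal_removeMultipleSentences : Prop := ∀ (text : List String), Dom_removeMultipleSentences text → Spec_removeMultipleSentences text (removeMultipleSentences text)

-- ===== LEMMAS AND PROOFS =====

-- in a ≤-sorted list, the head's occurrences are exactly the initial run:
-- the head does not reappear after the run
theorem pvHeadNotDrop (head : String) (xs : List String)
    (hl : (head :: xs).Pairwise (· ≤ ·)) :
    head ∉ xs.dropWhile (fun y => y == head) := by
  intro hmem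
  cases hdp : xs.dropWhile (fun y => y == head) with
  | nil => simp [hdp] at hmem
  | cons h t =>
    have hhne' : h ≠ head := by
      have := List.head_dropWhile_not (p := fun y => y == head) (l := xs)
        (by simp [hdp])
      simpa [hdp] using this
    have hhxs : h ∈ xs :=
      (List.dropWhile_sublist (p := fun y => y == head) (l := xs)).mem
        (by simp [hdp])
    have hlt : head < h :=
      lt_of_le_of_ne ((List.pairwise_cons.mp hl).1 h hhxs) (Ne.symm hhne')
    have hpw' : (h :: t).Pairwise (· ≤ ·) := hdp ▸
      (List.Pairwise.sublist (List.dropWhile_sublist _) (List.Pairwise.of_cons hl))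
    rw [hdp] at hmem
    rcases List.mem_cons.mp hmem with heq | hmt
    · exact hhne' heq.symm
    · exact absurd (lt_of_lt_of_le hlt ((List.pairwise_cons.mp hpw').1 head hmt))
        (lt_irrefl head)

-- count of the head = 1 + length of the initial run (sorted list)
theorem pvCountHead (head : String) (xs : List String)
    (hl : (head :: xs).Pairwise (· ≤ ·)) :
    (head :: xs).count head = 1 + (xs.takeWhile (fun y => y == head)).length := by
  rw [List.count_cons_self]
  conv_lhs => rw [← List.takeWhile_append_dropWhile (p := fun y => y == head) (l := xs)]
  rw [List.count_append]
  have h1 : (xs.takeWhile (fun y => y == head)).count head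
      = (xs.takeWhile (fun y => y == head)).length :=
    List.count_eq_length.mpr (fun y hy => by
      have := List.mem_takeWhile_imp hy; simp at this; simp [this])
  have h2 : (xs.dropWhile (fun y => y == head)).count head = 0 :=
    List.count_eq_zero.mpr (pvHeadNotDrop head xs hl)
  omega

-- count of a non-head value is unchanged by discarding the head's run
theorem pvCountNe (head : String) (xs : List String) (s : String) (hs : s ≠ head) :
    (head :: xs).count s = (xs.dropWhile (fun y => y == head)).count s := by
  have h0 : (xs.takeWhile (fun y => y == head)).count s = 0 :=
    List.count_eq_zero.mpr (fun hmem => by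
      have := List.mem_takeWhile_imp hmem; simp at this; exact hs this)
  have hx : xs.count s = (xs.dropWhile (fun y => y == head)).count s := by
    conv_lhs => rw [← List.takeWhile_append_dropWhile (p := fun y => y == head) (l := xs)]
    rw [List.count_append]; omega
  simp [Ne.symm hs, hx]

-- on a ≤-sorted list, pvFrequent collects exactly the values occurring at least 3 times
theorem mem_pvFrequent_iff (l : List String) (s : String) :
    l.Pairwise (· ≤ ·) → (s ∈ pvFrequent l ↔ 3 ≤ l.count s) := by
  induction l using pvFrequent.induct with
  | case1 => intro _; simp [pvFrequent]
  | case2 head xs run hge ih =>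
    intro hl
    have hihl := ih (List.Pairwise.sublist (List.dropWhile_sublist _) (List.Pairwise.of_cons hl))
    simp only [pvFrequent]
    rw [if_pos (show 3 ≤ 1 + (List.takeWhile (fun y => y == head) xs).length from hge)]
    simp only [List.mem_cons]
    by_cases hs : s = head
    · subst hs
      simp only [true_or, true_iff]
      rw [pvCountHead s xs hl]; omega
    · rw [pvCountNe head xs s hs]
      simp [hs, hihl]
  | case3 head xs run hlt ih =>
    intro hl
    have hihl := ih (List.Pairwise.sublist (List.dropWhile_sublist _) (List.Pairwise.of_cons hl))
    simp only [pvFrequent]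
    rw [if_neg (show ¬ 3 ≤ 1 + (List.takeWhile (fun y => y == head) xs).length from hlt)]
    by_cases hs : s = head
    · subst hs
      have hlt' : ¬ 3 ≤ 1 + (List.takeWhile (fun y => y == s) xs).length := hlt
      rw [hihl, pvCountHead s xs hl,
          List.count_eq_zero.mpr (pvHeadNotDrop s xs hl)]
      omega
    · rw [pvCountNe head xs s hs, hihl]

theorem removeMultipleSentences_spec : Claim_equal_removeMultipleSentences := by
  intro text _
  unfold Spec_removeMultipleSentences removeMultipleSentences removeMultipleSentences_alt
  simp only [PySem.Dict.foldl_insert_getD_add_one_eq_counter, PySem.Dict.getD_counter]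
  rw [PySem.List.foldl_append_ite_eq_filter (p := fun s => (List.count s text : Int) < 3)]
  refine List.filter_congr ?_
  intro s _
  have hmem : s ∈ pvFrequent (PySem.List.sorted text (fun x => x) false) ↔ 3 ≤ text.count s := by
    rw [mem_pvFrequent_iff _ s (PySem.List.sorted_pairwise text (fun x => x)),
        (PySem.List.sorted_perm text (fun x => x) false).count_eq]
  rw [Bool.eq_iff_iff]
  simp [PySem.Set.mem_ofList, hmem]
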